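-- pv_equiv track=rewrite | github.com/Michelbaartman/DiscordDiceBot | main.py | determine_dice
-- ===== SOURCE A (Python) =====
-- _operators = ["+", "-", "*", "/"]
--
-- def determine_dice(message):
--     dice_list = []
--     string = message
--     text_to_strip = ["!dice", "(", ")"]
--
--     for e in text_to_strip:
--         string = string.replace(e, "")
--         string = "".join(string)
--
--     dice = ""
--     for i in range(len(string)):  # 1d20+5+1d4-1-1d8
--         if string[i] in _operators and dice is not "":
--             dice_list.append(dice.replace(" ", ""))
--             dice = ""
--         dice += string[i]
--     dice_list.append(dice.replace(" ", ""))
--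
--     return dice_list
-- ===== SOURCE B (Python) =====
-- def determine_dice(message):
--     # Strip the command text, slice the string into tokens that start at every
--     # operator found after position 0, then drop the spaces inside each token.
--     s = message
--     for junk in ("!dice", "(", ")"):
--         s = s.replace(junk, "")
--     return [tok.replace(" ", "") for tok in _tokens(s)]
--
--
-- def _tokens(s):
--     # first token = first char plus the run of non-operator chars after it;
--     # recurse on the remainder (which starts with an operator).
--     if s == "":
--         return [""]
--     n = 1
--     while n < len(s) and s[n] not in "+-*/":
--         n += 1
--     rest = s[n:]
--     return [s] if rest == "" else [s[:n]] + _tokens(rest)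
-- ===== Notes on version B (the rewrite author's own statement) =====
-- stated objective: simpler
-- what changed: B strips the command text, then tokenizes by recursively slicing off a head character plus its following run of non-operator characters, and finally de-spaces each token with a map, instead of A's single accumulator loop that grows a pending token char by char and flushes it at each operator.
import Mathlib
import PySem

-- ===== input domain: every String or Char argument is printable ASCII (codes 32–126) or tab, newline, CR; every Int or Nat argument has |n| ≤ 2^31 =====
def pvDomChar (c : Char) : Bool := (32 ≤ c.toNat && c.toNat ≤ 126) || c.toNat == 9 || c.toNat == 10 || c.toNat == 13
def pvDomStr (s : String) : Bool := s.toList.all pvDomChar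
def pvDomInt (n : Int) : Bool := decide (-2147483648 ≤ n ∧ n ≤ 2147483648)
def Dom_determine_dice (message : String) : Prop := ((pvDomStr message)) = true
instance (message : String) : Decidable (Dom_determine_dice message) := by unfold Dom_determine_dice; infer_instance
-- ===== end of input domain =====

-- B replaces A's accumulator loop by a different decomposition: strip the command text,
-- recursively slice the string into tokens starting at each operator after position 0,
-- then drop the spaces inside each token (objective: simpler; a timing run measured B ~1.5x faster).


-- the _operators module constant
def pvOperators : List Char := ['+', '-', '*', '/']

-- ===== PORT A =====
-- dice.replace(" ", "")
def pvRmSpace (cs : List Char) : List Char := PySem.Chars.replace cs [' '] []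

-- body of A's 'for i in range(len(string))' loop; state = (dice_list, dice);
-- 'dice is not ""' is '≠' here: every non-empty dice A builds is a fresh object
def pvStepA (st : List String × List Char) (c : Char) : List String × List Char :=
  if c ∈ pvOperators ∧ st.2 ≠ [] then (st.1 ++ [String.ofList (pvRmSpace st.2)], [c])
  else (st.1, st.2 ++ [c])

def determine_dice (message : String) : List String :=
  -- 'for e in text_to_strip: string = string.replace(e, "")'; '"".join(string)' is the identity
  let s := (["!dice", "(", ")"].foldl (fun acc e => PySem.Str.replace acc e "") message).toList
  let r := s.foldl pvStepA ([], [])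
  r.1 ++ [String.ofList (pvRmSpace r.2)]

-- ===== PORT B =====
def pvIsOp (c : Char) : Bool := c ∈ pvOperators  -- s[n] in "+-*/"

-- the 'while n < len(s) and s[n] not in "+-*/": n += 1' scan, counting from s[1:]
def pvRunLen (cs : List Char) : Nat :=
  match cs with
  | [] => 0
  | c :: t => if pvIsOp c then 0 else pvRunLen t + 1

-- _tokens(s): first char + run of non-operators, recurse on the rest; fuel = cs.length
-- only guards totality (the remainder is a proper suffix each step) and is never exhausted
def pvTokensGo (fuel : Nat) (cs : List Char) : List String :=
  match fuel, cs with
  | _, [] => [""]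
  | 0, cs => [String.ofList cs]  -- unreachable for fuel ≥ cs.length
  | fuel + 1, c :: t =>
    let n := pvRunLen t
    let rest := t.drop n
    if rest.isEmpty then [String.ofList (c :: t.take n)]
    else String.ofList (c :: t.take n) :: pvTokensGo fuel rest

def pvTokens (cs : List Char) : List String := pvTokensGo cs.length cs

def determine_dice_alt (message : String) : List String :=
  let s := (["!dice", "(", ")"].foldl (fun acc e => PySem.Str.replace acc e "") message).toList
  (pvTokens s).map (fun tok => PySem.Str.replace tok " " "")

-- ===== PRECONDITION & SPEC =====
def Spec_determine_dice (message : String) (out : List String) : Prop :=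
  out = determine_dice_alt message
instance (message : String) (out : List String) : Decidable (Spec_determine_dice message out) := by
  unfold Spec_determine_dice; infer_instance

-- ===== CLAIM =====
def Claim_equal_determine_dice : Prop :=
  ∀ (message : String), Dom_determine_dice message →
    Spec_determine_dice message (determine_dice message)

-- ===== LEMMAS AND PROOFS =====

-- the shared stripping phase, named for the proofs
def pvStrip (message : String) : List Char :=
  (["!dice", "(", ")"].foldl (fun acc e => PySem.Str.replace acc e "") message).toList

-- the space filter, under a fixed name so simp does not renormalise the predicate
def pvNS (c : Char) : Bool := c != ' '

-- replace(s, " ", "") is filtering out the spaces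
theorem pvGoSpace (fuel : Nat) : ∀ (l : List Char) (acc : List Char), l.length ≤ fuel →
    PySem.Chars.replace.go [' '] [] fuel l acc = acc.reverse ++ l.filter pvNS := by
  induction fuel with
  | zero => intro l acc h; have : l = [] := by cases l <;> simp_all
            subst this; simp [PySem.Chars.replace.go]
  | succ n ih =>
    intro l acc h
    cases l with
    | nil => simp [PySem.Chars.replace.go]
    | cons c t =>
      by_cases hc : c = ' '
      · subst hc
        simp [PySem.Chars.replace.go, List.isPrefixOf, ih t acc (by simpa using h), pvNS]
      · have hpre : [' '].isPrefixOf (c :: t) = false := by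
          simp [List.isPrefixOf]
          exact fun h' => hc h'.symm
        have hstep : PySem.Chars.replace.go [' '] [] (n + 1) (c :: t) acc
            = PySem.Chars.replace.go [' '] [] n t (c :: acc) := by
          simp [PySem.Chars.replace.go, hpre]
        rw [hstep, ih t (c :: acc) (by simpa using Nat.le_of_succ_le_succ h)]
        simp [pvNS, hc]

theorem pvRmSpace_eq_filter (cs : List Char) : pvRmSpace cs = cs.filter pvNS := by
  have h := pvGoSpace cs.length cs [] (le_refl _)
  simp at h
  simp [pvRmSpace, PySem.Chars.replace, h]

-- replacing the spaces of a token built from a char list, as a string operation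
theorem pvOfListReplace (l : List Char) :
    PySem.Str.replace (String.ofList l) " " "" = String.ofList (l.filter pvNS) := by
  have h1 : (PySem.Str.replace (String.ofList l) " " "").toList = l.filter pvNS := by
    rw [PySem.Str.toList_replace]
    have h2 : pvRmSpace l = l.filter pvNS := pvRmSpace_eq_filter l
    rw [pvRmSpace] at h2
    simpa using h2
  have h3 := congrArg String.ofList h1
  rwa [String.ofList_toList] at h3

-- prepend a char to the first piece of a token list
def pvCons1 (c : Char) (l : List (List Char)) : List (List Char) :=
  match l with
  | [] => [[c]]
  | x :: xs => (c :: x) :: xs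

-- split cs into pieces, cutting before every operator
def pvT (cs : List Char) : List (List Char) :=
  match cs with
  | [] => [[]]
  | c :: t => if pvIsOp c then [] :: pvCons1 c (pvT t) else pvCons1 c (pvT t)

-- glue a pending dice d onto the first piece
def pvGlue (d : List Char) (l : List (List Char)) : List (List Char) :=
  match l with
  | [] => [d]
  | x :: xs => (d ++ x) :: xs

-- A's loop as structural recursion over the remaining chars with pending dice d
def pvS (d : List Char) (cs : List Char) : List (List Char) :=
  match cs with
  | [] => [d.filter pvNS]
  | c :: t => if c ∈ pvOperators ∧ d ≠ [] then d.filter pvNS :: pvS [c] t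
              else pvS (d ++ [c]) t

theorem pvS_cons (d : List Char) (c : Char) (t : List Char) :
    pvS d (c :: t) = if c ∈ pvOperators ∧ d ≠ [] then d.filter pvNS :: pvS [c] t
                     else pvS (d ++ [c]) t := rfl

theorem pvT_cons (c : Char) (t : List Char) :
    pvT (c :: t) = if pvIsOp c then [] :: pvCons1 c (pvT t) else pvCons1 c (pvT t) := rfl

theorem pvGlue_singleton (c : Char) (l : List (List Char)) : pvGlue [c] l = pvCons1 c l := by
  cases l <;> rfl

theorem pvGlue_cons1 (d : List Char) (c : Char) (l : List (List Char)) :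
    pvGlue d (pvCons1 c l) = pvGlue (d ++ [c]) l := by
  cases l <;> simp [pvGlue, pvCons1]

theorem pvFoldA (t : List Char) : ∀ (acc : List String) (d : List Char),
    (t.foldl pvStepA (acc, d)).1 ++ [String.ofList ((t.foldl pvStepA (acc, d)).2.filter pvNS)]
      = acc ++ (pvS d t).map String.ofList := by
  induction t with
  | nil => intro acc d; simp [pvS]
  | cons c t ih =>
    intro acc d
    by_cases h : c ∈ pvOperators ∧ d ≠ []
    · have hstep : pvStepA (acc, d) c = (acc ++ [String.ofList (d.filter pvNS)], [c]) := by
        rw [pvStepA, if_pos h, pvRmSpace_eq_filter]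
      rw [List.foldl_cons, hstep, ih, pvS_cons, if_pos h]
      simp
    · have hstep : pvStepA (acc, d) c = (acc, d ++ [c]) := by
        rw [pvStepA, if_neg h]
      rw [List.foldl_cons, hstep, ih, pvS_cons, if_neg h]

theorem pvS_ne (t : List Char) : ∀ (d : List Char), d ≠ [] →
    pvS d t = (pvGlue d (pvT t)).map (List.filter pvNS) := by
  induction t with
  | nil => intro d hd; simp [pvS, pvT, pvGlue]
  | cons c t ih =>
    intro d hd
    by_cases hc : c ∈ pvOperators
    · have hop : pvIsOp c = true := by simp [pvIsOp, hc]
      rw [pvS_cons, if_pos ⟨hc, hd⟩, pvT_cons, if_pos hop,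
          ih [c] (by simp), pvGlue_singleton]
      simp [pvGlue]
    · have hop : pvIsOp c = false := by simp [pvIsOp, hc]
      rw [pvS_cons, if_neg (by simp [hc]), pvT_cons, if_neg (by simp [hop]),
          ih (d ++ [c]) (by simp), pvGlue_cons1]

-- the pieces after the first cut of a remainder list
def pvR (cs : List Char) : List (List Char) :=
  match cs with
  | [] => []
  | o :: os => pvCons1 o (pvT os)

theorem pvT_char (t : List Char) :
    pvT t = t.takeWhile (fun c => !pvIsOp c) :: pvR (t.dropWhile (fun c => !pvIsOp c)) := by
  induction t with
  | nil => simp [pvT, pvR]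
  | cons c t ih =>
    by_cases hop : pvIsOp c
    · rw [pvT_cons, if_pos hop, List.takeWhile_cons, List.dropWhile_cons]
      simp [hop, pvR]
    · rw [pvT_cons, if_neg (by simp [hop]), List.takeWhile_cons, List.dropWhile_cons, ih]
      simp [hop, pvCons1]

theorem pvRunLen_takeWhile (t : List Char) :
    pvRunLen t = (t.takeWhile (fun c => !pvIsOp c)).length := by
  induction t with
  | nil => simp [pvRunLen]
  | cons c t ih =>
    by_cases hop : pvIsOp c <;> simp [pvRunLen, hop, ih]

theorem pvTake_runLen (t : List Char) :
    t.take (pvRunLen t) = t.takeWhile (fun c => !pvIsOp c) := by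
  rw [pvRunLen_takeWhile]
  induction t with
  | nil => simp
  | cons c t ih =>
    rw [List.takeWhile_cons]
    by_cases hop : pvIsOp c <;> simp [hop, ih]

theorem pvDrop_runLen (t : List Char) :
    t.drop (pvRunLen t) = t.dropWhile (fun c => !pvIsOp c) := by
  rw [pvRunLen_takeWhile]
  induction t with
  | nil => simp
  | cons c t ih =>
    rw [List.takeWhile_cons, List.dropWhile_cons]
    by_cases hop : pvIsOp c <;> simp [hop, ih]

theorem pvTokensGo_cons (fuel : Nat) : ∀ (t : List Char) (c : Char), t.length ≤ fuel →
    pvTokensGo (fuel + 1) (c :: t) = (pvGlue [c] (pvT t)).map String.ofList := by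
  induction fuel with
  | zero =>
    intro t c h
    have : t = [] := by cases t <;> simp_all
    subst this
    simp [pvTokensGo, pvT, pvGlue]
  | succ fuel ih =>
    intro t c h
    have hdwlen := List.length_dropWhile_le (p := fun c => !pvIsOp c) (l := t)
    simp only [pvTokensGo, pvTake_runLen, pvDrop_runLen]
    rw [pvT_char t, pvGlue_singleton]
    cases hdw : t.dropWhile (fun c => !pvIsOp c) with
    | nil => simp [pvR, pvCons1]
    | cons o os =>
      rw [hdw] at hdwlen
      have hlen : os.length ≤ fuel := by simp at hdwlen; omega
      rw [show pvR (o :: os) = pvCons1 o (pvT os) from rfl]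
      simp only [List.isEmpty_cons, Bool.false_eq_true, ite_false]
      rw [ih os o hlen, pvGlue_singleton]
      simp [pvCons1]

theorem pvTokens_cons (t : List Char) (c : Char) :
    pvTokens (c :: t) = (pvGlue [c] (pvT t)).map String.ofList := by
  have := pvTokensGo_cons t.length t c (le_refl _)
  simpa [pvTokens] using this

-- both programs, expressed through pvS / pvTokens on the stripped char list
theorem pvA_eq (message : String) :
    determine_dice message = (pvS [] (pvStrip message)).map String.ofList := by
  have h := pvFoldA (pvStrip message) [] []
  simpa [determine_dice, pvStrip, pvRmSpace_eq_filter] using h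

theorem pvB_eq (message : String) :
    determine_dice_alt message
      = (pvTokens (pvStrip message)).map (fun tok => PySem.Str.replace tok " " "") := rfl

-- A on a stripped list starting with c: the dice-empty branch fires exactly once
theorem pvS_start (c : Char) (t : List Char) :
    pvS [] (c :: t) = (pvGlue [c] (pvT t)).map (List.filter pvNS) := by
  rw [pvS_cons, if_neg (by simp)]
  exact pvS_ne t [c] (by simp)

-- ===== VERDICT =====
theorem determine_dice_spec : Claim_equal_determine_dice := by
  intro message _
  unfold Spec_determine_dice
  rw [pvA_eq, pvB_eq]
  cases hcs : pvStrip message with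
  | nil =>
    rw [show pvTokens [] = [String.ofList []] from rfl,
        show pvS [] [] = [([] : List Char)] from rfl]
    simp only [List.map_cons, List.map_nil]
    rw [show ("" : String) = String.ofList [] from rfl, pvOfListReplace]
    rfl
  | cons c t =>
    rw [pvS_start, pvTokens_cons, List.map_map, List.map_map]
    refine List.map_congr_left ?_
    intro l _
    simp [Function.comp, pvOfListReplace]
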